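-- pv_equiv track=rewrite | github.com/stephansigg/pairing_mmg | matching_test_resampling.py | grey_code_extraction_3bit
-- ===== SOURCE A (Python) =====
-- def grey_code_extraction_3bit(a, b):
--     if (a is None or len(a) == 0 or b is None or len(b) == 0):
--         ValueError(" grey_code_extraction:  invalid parameters ")
--     i = 0
--     bits_str = ''
--     while(i + jump < len(a) or i + jump < len(b)):
--         if (a[i + jump] - a[i] >= 0) and (b[i + jump] - b[i] >= 0):
--             if abs(b[i + jump] - b[i]) <= abs(a[i + jump] - a[i]):
--                 bits_str += '000'
--             else:
--                 bits_str += '001'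
--         elif (a[i + jump] - a[i] < 0) and (b[i + jump] - b[i] >= 0):
--             if abs(b[i + jump] - b[i]) > abs(a[i + jump] - a[i]):
--                 bits_str += '011'
--             else:
--                 bits_str += '010'
--         elif (a[i + jump] - a[i] < 0) and (b[i + jump] - b[i] < 0):
--             if abs(b[i + jump] - b[i]) <= abs(a[i + jump] - a[i]):
--                 bits_str += '110'
--             else:
--                 bits_str += '111'
--         else:
--             if abs(b[i + jump] - b[i]) > abs(a[i + jump] - a[i]):
--                 bits_str += '101'
--             else:
--                 bits_str += '100'
--         i += 1
--     return bits_str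
--
-- jump = 2
-- ===== SOURCE B (Python) =====
-- jump = 2
--
-- def grey_code_extraction_3bit(a, b):
--     # stride-`jump` differences via self-zip with a shifted slice
--     da = [x - y for x, y in zip(a[jump:], a)]
--     db = [x - y for x, y in zip(b[jump:], b)]
--     # three whole bit-planes, computed in separate passes
--     plane1 = ''.join('1' if d < 0 else '0' for d in db)
--     plane2 = ''.join('1' if d < 0 else '0' for d in da)
--     plane3 = ''.join('1' if abs(y) > abs(x) else '0' for x, y in zip(da, db))
--     # interleave the planes: one 3-bit code per step
--     return ''.join(c1 + c2 + c3 for c1, c2, c3 in zip(plane1, plane2, plane3))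
-- ===== Notes on version B (the rewrite author's own statement) =====
-- stated objective: faster
-- what changed: B computes the stride-2 difference sequences by zipping each list with its own 2-shifted slice, derives three whole bit-planes (sign of db, sign of da, magnitude comparison) in separate passes, and interleaves them with one final join, instead of A's index-driven while loop appending one of eight 3-char literals from a four-way sign cascade onto a growing string.
import Mathlib
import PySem

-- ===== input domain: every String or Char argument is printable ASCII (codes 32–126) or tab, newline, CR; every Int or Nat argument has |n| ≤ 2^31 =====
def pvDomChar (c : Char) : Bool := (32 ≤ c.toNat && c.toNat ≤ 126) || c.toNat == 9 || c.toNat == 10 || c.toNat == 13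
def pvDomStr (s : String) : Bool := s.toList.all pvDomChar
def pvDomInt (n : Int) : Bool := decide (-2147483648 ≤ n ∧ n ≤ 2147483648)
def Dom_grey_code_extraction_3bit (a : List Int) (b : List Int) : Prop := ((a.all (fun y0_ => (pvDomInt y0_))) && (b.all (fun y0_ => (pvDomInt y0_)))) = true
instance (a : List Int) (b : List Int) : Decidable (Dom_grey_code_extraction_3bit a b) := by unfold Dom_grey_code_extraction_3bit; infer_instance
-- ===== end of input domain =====

-- B replaces A's index-driven while loop with branch cascade by three whole bit-planes
-- built from zipped stride-2 difference sequences, interleaved at the end.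

-- ===== PORT A =====
-- A's while loop: condition i+jump < len a ∨ i+jump < len b, jump = 2; indices are
-- nonnegative (i ≥ 0), so Python's a[i+2]/a[i] is exactly List.getElem?; the `none`
-- (IndexError) case is excluded by Pre_ and returns the partial accumulator here.
def greyLoopA (a : List Int) (b : List Int) (i : Nat) (acc : String) : String :=
  if _h : i + 2 < a.length ∨ i + 2 < b.length then
    match a[i+2]?, a[i]?, b[i+2]?, b[i]? with
    | some a2, some a0, some b2, some b0 =>
      let code : String :=
        if a2 - a0 ≥ 0 ∧ b2 - b0 ≥ 0 then
          (if |b2 - b0| ≤ |a2 - a0| then "000" else "001")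
        else if a2 - a0 < 0 ∧ b2 - b0 ≥ 0 then
          (if |b2 - b0| > |a2 - a0| then "011" else "010")
        else if a2 - a0 < 0 ∧ b2 - b0 < 0 then
          (if |b2 - b0| ≤ |a2 - a0| then "110" else "111")
        else
          (if |b2 - b0| > |a2 - a0| then "101" else "100")
      greyLoopA a b (i + 1) (acc ++ code)
    | _, _, _, _ => acc  -- IndexError in Python; outside Pre_
  else acc
termination_by max a.length b.length - i
decreasing_by omega

def grey_code_extraction_3bit (a : List Int) (b : List Int) : String :=
  greyLoopA a b 0 ""

-- ===== PORT B =====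
-- Source B: stride-2 differences via zip(a[2:], a); three bit-plane passes; interleave.
def grey_code_extraction_3bit_alt (a : List Int) (b : List Int) : String :=
  let da := ((a.drop 2).zip a).map (fun p => p.1 - p.2)
  let db := ((b.drop 2).zip b).map (fun p => p.1 - p.2)
  let plane1 := db.map (fun d => if d < 0 then '1' else '0')
  let plane2 := da.map (fun d => if d < 0 then '1' else '0')
  let plane3 := (da.zip db).map (fun p => if |p.2| > |p.1| then '1' else '0')
  String.ofList ((((plane1.zip plane2).zip plane3).map
    (fun p => [p.1.1, p.1.2, p.2])).flatten)

-- ===== PRECONDITION & SPEC =====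
-- Pre_: exactly the inputs where A returns without IndexError: equal lengths, or
-- both lists short enough that the loop never runs.
def Pre_grey_code_extraction_3bit (a : List Int) (b : List Int) : Prop :=
  a.length = b.length ∨ (a.length ≤ 2 ∧ b.length ≤ 2)
instance (a : List Int) (b : List Int) : Decidable (Pre_grey_code_extraction_3bit a b) := by
  unfold Pre_grey_code_extraction_3bit; infer_instance

def pvWitness_grey_code_extraction_3bit : List Int × List Int := ([1, 2, 3, -1], [3, 2, 1, 5])

def Spec_grey_code_extraction_3bit (a : List Int) (b : List Int) (out : String) : Prop := out = grey_code_extraction_3bit_alt a b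
instance (a : List Int) (b : List Int) (out : String) : Decidable (Spec_grey_code_extraction_3bit a b out) := by unfold Spec_grey_code_extraction_3bit; infer_instance

-- ===== CLAIM (what is proved, stated in full; the proofs are below) =====
def Claim_equal_grey_code_extraction_3bit : Prop := ∀ (a : List Int) (b : List Int), Dom_grey_code_extraction_3bit a b → Pre_grey_code_extraction_3bit a b → Spec_grey_code_extraction_3bit a b (grey_code_extraction_3bit a b)

-- ===== LEMMAS AND PROOFS =====

-- Proof-side description of one step's three bits (used by both directions).
def bitsAt (a b : List Int) (i : Nat) : List Char :=
  let da := (a[i+2]?).getD 0 - (a[i]?).getD 0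
  let db := (b[i+2]?).getD 0 - (b[i]?).getD 0
  [(if db < 0 then '1' else '0'),
   (if da < 0 then '1' else '0'),
   (if |db| > |da| then '1' else '0')]

-- A's per-step 3-char literal equals the three bits.
lemma code_eq_bits (da db : Int) :
    (if da ≥ 0 ∧ db ≥ 0 then (if |db| ≤ |da| then "000" else "001")
     else if da < 0 ∧ db ≥ 0 then (if |db| > |da| then "011" else "010")
     else if da < 0 ∧ db < 0 then (if |db| ≤ |da| then "110" else "111")
     else (if |db| > |da| then "101" else "100"))
    = String.ofList [(if db < 0 then '1' else '0'),
                 (if da < 0 then '1' else '0'),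
                 (if |db| > |da| then '1' else '0')] := by
  rcases abs_cases da with ⟨hda, hda'⟩ | ⟨hda, hda'⟩ <;>
    rcases abs_cases db with ⟨hdb, hdb'⟩ | ⟨hdb, hdb'⟩ <;>
      split_ifs <;> first | rfl | omega

lemma greyLoopA_eq (a b : List Int) (h : a.length = b.length) (i : Nat) (acc : String) :
    greyLoopA a b i acc
      = acc ++ String.ofList (((List.range' i (a.length - 2 - i))).map (bitsAt a b)).flatten := by
  have hmain : ∀ k i acc, a.length - 2 - i = k →
      greyLoopA a b i acc
        = acc ++ String.ofList ((List.range' i k).map (bitsAt a b)).flatten := by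
    intro k
    induction k with
    | zero =>
      intro i acc hk
      rw [greyLoopA]
      have : ¬ (i + 2 < a.length ∨ i + 2 < b.length) := by omega
      rw [dif_neg this]
      simp [List.range']
    | succ k ih =>
      intro i acc hk
      rw [greyLoopA]
      have hc : i + 2 < a.length ∨ i + 2 < b.length := by omega
      have ha2 : i + 2 < a.length := by omega
      have hb2 : i + 2 < b.length := by omega
      rw [dif_pos hc]
      rw [List.getElem?_eq_getElem ha2, List.getElem?_eq_getElem (by omega : i < a.length),
          List.getElem?_eq_getElem hb2, List.getElem?_eq_getElem (by omega : i < b.length)]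
      simp only
      rw [ih (i + 1) _ (by omega)]
      rw [List.range'_succ]
      have hbits : bitsAt a b i
          = [(if b[i+2] - b[i] < 0 then '1' else '0'),
             (if a[i+2] - a[i] < 0 then '1' else '0'),
             (if |b[i+2] - b[i]| > |a[i+2] - a[i]| then '1' else '0')] := by
        simp [bitsAt, ha2, hb2,
              (by omega : i < a.length), (by omega : i < b.length)]
      rw [code_eq_bits (a[i+2] - a[i]) (b[i+2] - b[i])]
      apply String.ext
      simp [hbits]
  exact hmain _ i acc rfl

-- B's interleaved planes equal the flattened per-step bits, for equal lengths.
lemma alt_eq_bits (a b : List Int) (h : a.length = b.length) :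
    grey_code_extraction_3bit_alt a b
      = String.ofList ((List.range' 0 (a.length - 2)).map (bitsAt a b)).flatten := by
  unfold grey_code_extraction_3bit_alt
  dsimp only
  congr 1
  congr 1
  apply List.ext_getElem
  · simp [List.length_zip, List.length_drop]; omega
  · intro i h1 h2
    have hlen : i < a.length - 2 := by
      have := h1; simp [List.length_zip, List.length_drop] at this; omega
    have ha2 : i + 2 < a.length := by omega
    have hb2 : i + 2 < b.length := by omega
    have hia : i < a.length := by omega
    have hib : i < b.length := by omega
    simp [List.getElem_zip, List.getElem_drop, bitsAt,
          ha2, hb2, hia, hib, Nat.add_comm 2 i]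

-- ===== VERDICT (by name: the statement is the Claim_ definition above) =====
theorem grey_code_extraction_3bit_spec : Claim_equal_grey_code_extraction_3bit := by
  intro a b _ hpre
  unfold Spec_grey_code_extraction_3bit
  rcases hpre with h | ⟨ha, hb⟩
  · unfold grey_code_extraction_3bit
    rw [greyLoopA_eq a b h 0 "", alt_eq_bits a b h]
    simp
  · unfold grey_code_extraction_3bit grey_code_extraction_3bit_alt
    rw [greyLoopA]
    have h1 : ¬ (0 + 2 < a.length ∨ 0 + 2 < b.length) := by omega
    have h2 : (a.drop 2) = [] := by
      apply List.eq_nil_of_length_eq_zero; simp; omega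
    simp [h1, h2]
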